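-- pv_equiv track=rewrite | github.com/FengJingLiu/bayes_poker | src/bayes_poker/storage/position.py | map_all_positions
-- ===== SOURCE A (Python) =====
-- POSITIONS_6MAX = ["BTN", "SB", "BB", "UTG", "MP", "CO"]
--
-- POSITIONS_5MAX = ["BTN", "SB", "BB", "UTG", "CO"]
--
-- POSITIONS_4MAX = ["BTN", "SB", "BB", "UTG"]
--
-- POSITIONS_3MAX = ["BTN", "SB", "BB"]
--
-- POSITIONS_2MAX = ["BTN", "BB"]
--
-- def get_position_list(player_count: int) -> list[str]:
--     if player_count >= 6:
--         return POSITIONS_6MAX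
--     elif player_count == 5:
--         return POSITIONS_5MAX
--     elif player_count == 4:
--         return POSITIONS_4MAX
--     elif player_count == 3:
--         return POSITIONS_3MAX
--     else:
--         return POSITIONS_2MAX
--
-- def compute_relative_position(
--     seat_no: int,
--     button_seat: int,
--     seat_count: int,
--     occupied_seats: list[int],
-- ) -> str | None:
--     """
--     计算玩家的相对位置。
--
--     Args:
--         seat_no: 玩家座位号 (1-based)
--         button_seat: 按钮位座位号 (1-based)
--         seat_count: 最大座位数
--         occupied_seats: 所有在座玩家的座位号列表
--
--     Returns:
--         相对位置字符串 (BTN/SB/BB/UTG/MP/CO)，若无法计算返回 None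
--     """
--     if not occupied_seats or button_seat not in occupied_seats:
--         return None
--
--     sorted_seats = sorted(occupied_seats)
--     player_count = len(sorted_seats)
--     positions = get_position_list(player_count)
--
--     btn_index = sorted_seats.index(button_seat)
--
--     ordered_seats = []
--     for i in range(player_count):
--         idx = (btn_index + i) % player_count
--         ordered_seats.append(sorted_seats[idx])
--
--     if seat_no not in ordered_seats:
--         return None
--
--     position_index = ordered_seats.index(seat_no)
--
--     if position_index < len(positions):
--         return positions[position_index]
--
--     return None
--
-- def map_all_positions(
--     button_seat: int,
--     seat_count: int,
--     player_seats: list[int],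
-- ) -> dict[int, str]:
--     """
--     为所有玩家计算相对位置映射。
--
--     Returns:
--         dict[seat_no, rel_pos]
--     """
--     result = {}
--     for seat_no in player_seats:
--         pos = compute_relative_position(
--             seat_no=seat_no,
--             button_seat=button_seat,
--             seat_count=seat_count,
--             occupied_seats=player_seats,
--         )
--         if pos:
--             result[seat_no] = pos
--     return result
-- ===== SOURCE B (Python) =====
-- POSITIONS_6MAX = ["BTN", "SB", "BB", "UTG", "MP", "CO"]
-- POSITIONS_5MAX = ["BTN", "SB", "BB", "UTG", "CO"]
-- POSITIONS_4MAX = ["BTN", "SB", "BB", "UTG"]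
-- POSITIONS_3MAX = ["BTN", "SB", "BB"]
-- POSITIONS_2MAX = ["BTN", "BB"]
--
-- def get_position_list(player_count):
--     if player_count >= 6:
--         return POSITIONS_6MAX
--     elif player_count == 5:
--         return POSITIONS_5MAX
--     elif player_count == 4:
--         return POSITIONS_4MAX
--     elif player_count == 3:
--         return POSITIONS_3MAX
--     else:
--         return POSITIONS_2MAX
--
-- def map_all_positions(button_seat, seat_count, player_seats):
--     if button_seat not in player_seats:
--         return {}
--     sorted_seats = sorted(player_seats)
--     btn_index = sorted_seats.index(button_seat)
--     ordered = sorted_seats[btn_index:] + sorted_seats[:btn_index]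
--     positions = get_position_list(len(sorted_seats))
--     mapping = {}
--     for pos, seat in zip(positions, ordered):
--         if seat not in mapping:
--             mapping[seat] = pos
--     return {s: mapping[s] for s in player_seats if s in mapping}
-- ===== Notes on version B (the rewrite author's own statement) =====
-- stated objective: faster
-- what changed: A re-sorts, re-rotates and re-scans the seat list once per player (O(n^2)); B sorts once, builds the button-rotated order once with two slices, assigns positions in a single zip pass into a dict, and then maps each player by one dict lookup (O(n log n)).
import Mathlib
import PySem

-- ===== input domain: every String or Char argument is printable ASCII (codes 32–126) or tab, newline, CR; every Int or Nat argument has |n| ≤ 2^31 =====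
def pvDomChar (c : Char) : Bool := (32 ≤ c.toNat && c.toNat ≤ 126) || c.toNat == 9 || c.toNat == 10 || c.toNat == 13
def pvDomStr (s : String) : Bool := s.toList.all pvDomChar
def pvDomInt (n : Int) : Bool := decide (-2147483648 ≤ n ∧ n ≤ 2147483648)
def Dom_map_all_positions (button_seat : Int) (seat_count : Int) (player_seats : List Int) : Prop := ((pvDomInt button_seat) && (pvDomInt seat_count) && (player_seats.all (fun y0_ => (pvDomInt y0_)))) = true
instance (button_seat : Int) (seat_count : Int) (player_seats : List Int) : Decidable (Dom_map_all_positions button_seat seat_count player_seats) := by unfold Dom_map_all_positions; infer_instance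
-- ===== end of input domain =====

-- B sorts and rotates the seat list once and assigns positions in one pass via a dict
-- instead of recomputing them per player (objective: faster, O(n log n) vs O(n^2)).

-- ===== PORT A =====
-- module-level constants (shared by both sources)
def POSITIONS_6MAX : List String := ["BTN", "SB", "BB", "UTG", "MP", "CO"]
def POSITIONS_5MAX : List String := ["BTN", "SB", "BB", "UTG", "CO"]
def POSITIONS_4MAX : List String := ["BTN", "SB", "BB", "UTG"]
def POSITIONS_3MAX : List String := ["BTN", "SB", "BB"]
def POSITIONS_2MAX : List String := ["BTN", "BB"]

def get_position_list (player_count : Int) : List String :=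
  if player_count ≥ 6 then POSITIONS_6MAX
  else if player_count = 5 then POSITIONS_5MAX
  else if player_count = 4 then POSITIONS_4MAX
  else if player_count = 3 then POSITIONS_3MAX
  else POSITIONS_2MAX

def compute_relative_position (seat_no : Int) (button_seat : Int) (seat_count : Int)
    (occupied_seats : List Int) : Option String :=
  if occupied_seats = [] ∨ button_seat ∉ occupied_seats then none
  else
    let sorted_seats := PySem.List.sorted occupied_seats (fun x => x) false
    let player_count := sorted_seats.length
    let positions := get_position_list (player_count : Int)
    match PySem.List.index? sorted_seats button_seat with
    | none => none        -- unreachable (button_seat ∈ occupied_seats); Python .index would raise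
    | some btn_index =>
      -- sorted_seats[(btn_index+i) % player_count]: index provably in range, so pyGetD is exact
      let ordered_seats := (PySem.List.pyRange 0 (player_count : Int) 1).foldl
        (fun acc i =>
          acc ++ [PySem.List.pyGetD sorted_seats (PySem.Int.mod ((btn_index : Int) + i) (player_count : Int)) 0]) []
      if seat_no ∉ ordered_seats then none
      else
        match PySem.List.index? ordered_seats seat_no with
        | none => none    -- unreachable (seat_no ∈ ordered_seats)
        | some position_index =>
          if (position_index : Int) < (positions.length : Int) then
            some (PySem.List.pyGetD positions (position_index : Int) "")  -- index < len, exact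
          else none

def map_all_positions (button_seat : Int) (seat_count : Int) (player_seats : List Int) :
    List (Int × String) :=
  (player_seats.foldl
    (fun result seat_no =>
      match compute_relative_position seat_no button_seat seat_count player_seats with
      | some pos => if pos ≠ "" then result.insert seat_no pos else result   -- 'if pos:'
      | none => result)
    (PySem.Dict.empty : PySem.Dict Int String)).items

-- ===== PORT B =====
def map_all_positions_alt (button_seat : Int) (seat_count : Int) (player_seats : List Int) :
    List (Int × String) :=
  if button_seat ∉ player_seats then ([] : List (Int × String))
  else
    let sorted_seats := PySem.List.sorted player_seats (fun x => x) false
    match PySem.List.index? sorted_seats button_seat with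
    | none => []          -- unreachable (button_seat ∈ player_seats); Python .index would raise
    | some btn_index =>
      let ordered := PySem.List.slice sorted_seats (some (btn_index : Int)) none ++
                     PySem.List.slice sorted_seats none (some (btn_index : Int))
      let positions := get_position_list (sorted_seats.length : Int)
      let mapping := (positions.zip ordered).foldl
        (fun m pv => if m.contains pv.2 then m else m.insert pv.2 pv.1)
        (PySem.Dict.empty : PySem.Dict Int String)
      (player_seats.foldl
        (fun r s => match mapping.get? s with | some p => r.insert s p | none => r)
        (PySem.Dict.empty : PySem.Dict Int String)).items

-- ===== PRECONDITION & SPEC =====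
def Spec_map_all_positions (button_seat : Int) (seat_count : Int) (player_seats : List Int) (out : List (Int × String)) : Prop := out = map_all_positions_alt button_seat seat_count player_seats
instance (button_seat : Int) (seat_count : Int) (player_seats : List Int) (out : List (Int × String)) : Decidable (Spec_map_all_positions button_seat seat_count player_seats out) := by unfold Spec_map_all_positions; infer_instance

-- ===== CLAIM (what is proved, stated in full; the proofs are below) =====
def Claim_equal_map_all_positions : Prop := ∀ (button_seat : Int) (seat_count : Int) (player_seats : List Int), Dom_map_all_positions button_seat seat_count player_seats → Spec_map_all_positions button_seat seat_count player_seats (map_all_positions button_seat seat_count player_seats)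

-- ===== LEMMAS AND PROOFS =====

-- first-match position assignment: the value zip(positions, ordered) gives a seat
def lookIdx : List String → List Int → Int → Option String
  | [], _, _ => none
  | _ :: _, [], _ => none
  | p :: P, a :: ord, s => if a = s then some p else lookIdx P ord s

theorem lookIdx_eq_index? (ord : List Int) (P : List String) (s : Int) :
    lookIdx P ord s = (PySem.List.index? ord s).bind (fun i => P[i]?) := by
  induction ord generalizing P with
  | nil =>
    rw [(PySem.List.index?_eq_none_iff ([] : List Int) s).mpr (by simp)]
    cases P <;> simp [lookIdx]
  | cons a ord ih =>
    cases P with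
    | nil =>
      simp only [lookIdx]
      cases h : PySem.List.index? (a :: ord) s <;> simp
    | cons p P =>
      by_cases h : a = s
      · subst h
        rw [PySem.List.index?_cons_self]
        simp [lookIdx]
      · rw [PySem.List.index?_cons_of_ne _ h]
        simp only [lookIdx, if_neg h, ih]
        cases PySem.List.index? ord s <;> simp

theorem lookIdx_mem {P : List String} {ord : List Int} {s : Int} {p : String}
    (h : lookIdx P ord s = some p) : p ∈ P := by
  induction ord generalizing P with
  | nil => cases P <;> simp [lookIdx] at h
  | cons a ord ih =>
    cases P with
    | nil => simp [lookIdx] at h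
    | cons q P =>
      simp only [lookIdx] at h
      split at h
      · cases h; exact List.mem_cons_self
      · exact List.mem_cons_of_mem _ (ih h)

theorem get?_zipfold (ord : List Int) (P : List String) (d : PySem.Dict Int String) (s : Int) :
    ((P.zip ord).foldl (fun m pv => if m.contains pv.2 then m else m.insert pv.2 pv.1) d).get? s
      = match d.get? s with
        | some v => some v
        | none => lookIdx P ord s := by
  induction ord generalizing P d with
  | nil =>
    cases P <;> (simp only [List.zip_nil_right, List.zip_nil_left, List.foldl_nil, lookIdx]
                 <;> cases d.get? s <;> rfl)
  | cons a ord ih =>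
    cases P with
    | nil =>
      simp only [List.zip_nil_left, List.foldl_nil, lookIdx]
      cases d.get? s <;> rfl
    | cons p P =>
      simp only [List.zip_cons_cons, List.foldl_cons, ih]
      by_cases hda : d.contains a = true
      · rw [if_pos hda]
        by_cases hsa : s = a
        · subst hsa
          have hsome : (d.get? s).isSome = true := by
            rw [← PySem.Dict.contains_eq_isSome_get?]; exact hda
          obtain ⟨v, hv⟩ := Option.isSome_iff_exists.mp hsome
          simp [hv]
        · have has : ¬ a = s := fun h => hsa h.symm
          simp only [lookIdx, if_neg has]
      · rw [if_neg hda]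
        have hda' : d.contains a = false := by simpa using hda
        by_cases hsa : s = a
        · subst hsa
          have hnone : d.get? s = none :=
            (PySem.Dict.get?_eq_none_iff_contains d s).mpr hda'
          rw [PySem.Dict.get?_insert, if_pos rfl]
          simp [hnone, lookIdx]
        · rw [PySem.Dict.get?_insert, if_neg hsa]
          have has : ¬ a = s := fun h => hsa h.symm
          simp only [lookIdx, if_neg has]

theorem pos_ne_empty {m : Int} {p : String} (h : p ∈ get_position_list m) : p ≠ "" := by
  unfold get_position_list POSITIONS_6MAX POSITIONS_5MAX POSITIONS_4MAX POSITIONS_3MAX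
    POSITIONS_2MAX at h
  split_ifs at h <;> fin_cases h <;> decide

theorem foldl_const {α β : Type} (l : List β) (e : α) : l.foldl (fun r _ => r) e = e := by
  induction l generalizing e with
  | nil => rfl
  | cons x l ih => simpa using ih e

-- the range/mod loop of A builds exactly the two-slice rotation of B
theorem rotation_eq (ss : List Int) (k : Nat) (hk : k < ss.length) :
    (PySem.List.pyRange 0 (ss.length : Int) 1).foldl
      (fun acc i =>
        acc ++ [PySem.List.pyGetD ss (PySem.Int.mod ((k : Int) + i) (ss.length : Int)) 0]) []
      = ss.drop k ++ ss.take k := by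
  rw [PySem.List.foldl_append_singleton_eq_map]
  apply List.ext_getElem
  · simp only [List.nil_append, List.length_map, PySem.List.length_pyRange_one,
      List.length_append, List.length_drop, List.length_take]
    omega
  · intro j hj1 hj2
    simp only [List.nil_append, List.getElem_map]
    rw [PySem.List.getElem_pyRange_one]
    have hn : 0 < (ss.length : Int) := by omega
    rw [PySem.Int.mod_eq_emod_of_pos hn]
    have hjn : j < ss.length := by
      simpa only [List.nil_append, List.length_map, PySem.List.length_pyRange_one,
        Int.sub_zero, Int.toNat_natCast] using hj1
    by_cases hcase : k + j < ss.length
    · have hcast : (k : Int) + (0 + (j : Int)) = ((k + j : Nat) : Int) := by push_cast; ring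
      rw [hcast, Int.emod_eq_of_lt (by exact_mod_cast Nat.zero_le _) (by exact_mod_cast hcase),
        PySem.List.pyGetD_natCast]
      rw [List.getD_eq_getElem _ _ (by omega)]
      rw [List.getElem_append_left (by simpa using by omega : j < (ss.drop k).length)]
      simp [List.getElem_drop]
    · have hle : ss.length ≤ k + j := Nat.le_of_not_lt hcase
      have hub : k + j - ss.length < ss.length := by omega
      have hcast : (k : Int) + (0 + (j : Int))
          = ((k + j - ss.length : Nat) : Int) + (ss.length : Int) * 1 := by
        rw [Nat.cast_sub hle]; push_cast; ring
      rw [hcast, Int.add_mul_emod_self_left,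
        Int.emod_eq_of_lt (by exact_mod_cast Nat.zero_le _) (by exact_mod_cast hub),
        PySem.List.pyGetD_natCast]
      rw [List.getD_eq_getElem _ _ (by omega)]
      rw [List.getElem_append_right (by simpa using by omega : (ss.drop k).length ≤ j)]
      simp only [List.getElem_take, List.length_drop]
      congr 1
      omega

theorem index?_lt_length {ss : List Int} {b : Int} {k : Nat}
    (hk : PySem.List.index? ss b = some k) : k < ss.length := by
  rw [PySem.List.index?_eq_idxOf?] at hk
  obtain ⟨h, -, -⟩ := List.idxOf?_eq_some_iff.mp hk
  exact h

-- A's per-seat result, under bs ∈ ps, is the first-match lookup in the rotated order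
theorem crp_eq (s bs sc : Int) (ps : List Int) (hmem : bs ∈ ps) {k : Nat}
    (hk : PySem.List.index? (PySem.List.sorted ps (fun x => x) false) bs = some k) :
    compute_relative_position s bs sc ps
      = lookIdx (get_position_list ((PySem.List.sorted ps (fun x => x) false).length : Int))
          ((PySem.List.sorted ps (fun x => x) false).drop k
            ++ (PySem.List.sorted ps (fun x => x) false).take k) s := by
  have hne : ¬ (ps = [] ∨ bs ∉ ps) := by
    rintro (rfl | h)
    · cases hmem
    · exact h hmem
  have hklt : k < (PySem.List.sorted ps (fun x => x) false).length := index?_lt_length hk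
  unfold compute_relative_position
  rw [if_neg hne]
  simp only [hk]
  rw [rotation_eq _ k hklt]
  set ss := PySem.List.sorted ps (fun x => x) false with hss
  set ord := ss.drop k ++ ss.take k with hord
  set P := get_position_list (ss.length : Int) with hP
  by_cases hs : s ∈ ord
  · rw [if_neg (by simpa using hs)]
    have hidx : (PySem.List.index? ord s).isSome = true :=
      (PySem.List.index?_isSome_iff ord s).mpr hs
    obtain ⟨i, hi⟩ := Option.isSome_iff_exists.mp hidx
    rw [hi]
    simp only
    rw [lookIdx_eq_index? ord P s, hi, Option.bind]
    by_cases hlt : (i : Int) < (P.length : Int)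
    · rw [if_pos hlt]
      have hilt : i < P.length := by exact_mod_cast hlt
      rw [PySem.List.pyGetD_natCast, List.getD_eq_getElem _ _ hilt,
        List.getElem?_eq_getElem hilt]
    · rw [if_neg hlt]
      have hge : P.length ≤ i := by omega
      rw [List.getElem?_eq_none hge]
  · rw [if_pos (by simpa using hs)]
    rw [lookIdx_eq_index? ord P s, (PySem.List.index?_eq_none_iff ord s).mpr hs]
    rfl

-- ===== VERDICT (by name: the statement is the Claim_ definition above) =====
theorem map_all_positions_spec : Claim_equal_map_all_positions := by
  intro bs sc ps _hdom
  unfold Spec_map_all_positions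
  unfold map_all_positions map_all_positions_alt
  by_cases hmem : bs ∈ ps
  · rw [if_neg (not_not_intro hmem)]
    have hmem' : bs ∈ PySem.List.sorted ps (fun x => x) false := by
      rw [PySem.List.mem_sorted]; exact hmem
    have hsome : (PySem.List.index? (PySem.List.sorted ps (fun x => x) false) bs).isSome = true :=
      (PySem.List.index?_isSome_iff _ bs).mpr hmem'
    obtain ⟨k, hk⟩ := Option.isSome_iff_exists.mp hsome
    have hklt : k < (PySem.List.sorted ps (fun x => x) false).length := index?_lt_length hk
    simp only [hk, PySem.List.slice_from_natCast, PySem.List.slice_to_natCast]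
    congr 1
    refine PySem.List.foldl_congr_mem ps _ _ _ (fun r s _hs => ?_)
    rw [crp_eq s bs sc ps hmem hk,
      get?_zipfold ((PySem.List.sorted ps (fun x => x) false).drop k
          ++ (PySem.List.sorted ps (fun x => x) false).take k)
        (get_position_list ((PySem.List.sorted ps (fun x => x) false).length : Int))
        PySem.Dict.empty s,
      PySem.Dict.get?_empty]
    simp only
    cases hli : lookIdx (get_position_list ((PySem.List.sorted ps (fun x => x) false).length : Int))
        ((PySem.List.sorted ps (fun x => x) false).drop k
          ++ (PySem.List.sorted ps (fun x => x) false).take k) s with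
    | none => rfl
    | some p =>
      simp only
      rw [if_pos (pos_ne_empty (lookIdx_mem hli))]
  · rw [if_pos hmem]
    have hstep : ∀ (r : PySem.Dict Int String) (s : Int), s ∈ ps →
        (match compute_relative_position s bs sc ps with
          | some pos => if pos ≠ "" then r.insert s pos else r
          | none => r) = r := by
      intro r s _
      unfold compute_relative_position
      rw [if_pos (Or.inr hmem)]
    rw [PySem.List.foldl_congr_mem ps _ (fun r _ => r) PySem.Dict.empty
      (fun r s hs => hstep r s hs)]
    rw [foldl_const]
    rfl
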